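-- pv_equiv track=rewrite | github.com/pranit1812/Pranit-RAG | src/extractors/unstructured_extractor.py | _is_construction_content
-- ===== SOURCE A (Python) =====
-- def _is_construction_content(text: str) -> bool:
--     """
--     Detect if text contains construction-specific content.
--
--     Args:
--         text: Text to analyze
--
--     Returns:
--         True if construction content is detected
--     """
--     construction_keywords = [
--         'concrete', 'steel', 'hvac', 'electrical', 'plumbing',
--         'structural', 'architectural', 'mechanical', 'specification',
--         'drawing', 'plan', 'elevation', 'section', 'detail',
--         'contractor', 'subcontractor', 'bid', 'estimate'
--     ]
--
--     text_lower = text.lower()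
--     return any(keyword in text_lower for keyword in construction_keywords)
-- ===== SOURCE B (Python) =====
-- def _is_construction_content(text: str) -> bool:
--     # single left-to-right scan of the lowercased text, with keywords
--     # indexed by their first character so each position checks only the
--     # few keywords that could start there
--     buckets = {
--         'c': ['concrete', 'contractor'],
--         's': ['steel', 'structural', 'specification', 'section', 'subcontractor'],
--         'h': ['hvac'],
--         'e': ['electrical', 'elevation', 'estimate'],
--         'p': ['plumbing', 'plan'],
--         'a': ['architectural'],
--         'm': ['mechanical'],
--         'd': ['drawing', 'detail'],
--         'b': ['bid'],
--     }
--     t = text.lower()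
--     for i, ch in enumerate(t):
--         for kw in buckets.get(ch, ()):
--             if t.startswith(kw, i):
--                 return True
--     return False
-- ===== Notes on version B (the rewrite author's own statement) =====
-- stated objective: alternative
-- what changed: A runs a separate membership substring search over the lowered text for each of the 18 keywords; B lowers the text once and makes a single left-to-right scan over it, checking at each position only the keywords indexed by that position's first character in a precomputed dict.
import Mathlib
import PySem

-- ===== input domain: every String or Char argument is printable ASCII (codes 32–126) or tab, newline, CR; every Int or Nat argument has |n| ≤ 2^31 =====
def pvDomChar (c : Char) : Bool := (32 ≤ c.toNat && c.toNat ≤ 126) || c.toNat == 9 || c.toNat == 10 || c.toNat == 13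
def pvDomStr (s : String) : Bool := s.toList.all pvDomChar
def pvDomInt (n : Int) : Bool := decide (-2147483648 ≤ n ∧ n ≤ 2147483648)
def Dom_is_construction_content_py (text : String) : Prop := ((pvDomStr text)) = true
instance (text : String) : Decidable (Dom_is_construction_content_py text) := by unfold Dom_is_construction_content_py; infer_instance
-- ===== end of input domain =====

-- B replaces A's 18 independent substring searches by one left-to-right scan of the
-- lowered text with the keywords indexed by first character (objective: alternative).

-- ===== PORT A =====
-- A: lower the text once, then run a separate 'keyword in text_lower' substring test per keyword.
def is_construction_content_py (text : String) : Bool :=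
  let construction_keywords : List String :=
    ["concrete", "steel", "hvac", "electrical", "plumbing",
     "structural", "architectural", "mechanical", "specification",
     "drawing", "plan", "elevation", "section", "detail",
     "contractor", "subcontractor", "bid", "estimate"]
  let text_lower := PySem.Str.lower text
  construction_keywords.any (fun keyword => PySem.Str.isIn keyword text_lower)

-- ===== PORT B =====
-- B: one scan over the lowered text; at each position, check only the keywords
-- indexed (in a dict) under that position's character.
def pvBuckets : PySem.Dict Char (List String) :=
  PySem.Dict.ofList
  [('c', ["concrete", "contractor"]),
   ('s', ["steel", "structural", "specification", "section", "subcontractor"]),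
   ('h', ["hvac"]),
   ('e', ["electrical", "elevation", "estimate"]),
   ('p', ["plumbing", "plan"]),
   ('a', ["architectural"]),
   ('m', ["mechanical"]),
   ('d', ["drawing", "detail"]),
   ('b', ["bid"])]

-- Source B's 'for i, ch in enumerate(t)' loop as recursion on the remaining suffix;
-- 't.startswith(kw, i)' is 'startswith <suffix at i> kw'
def pvScan : List Char → Bool
  | [] => false
  | ch :: rest =>
    if (PySem.Dict.getD pvBuckets ch []).any
         (fun kw => PySem.Chars.startswith (ch :: rest) kw.toList) then true
    else pvScan rest

def is_construction_content_py_alt (text : String) : Bool :=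
  pvScan (PySem.Str.lower text).toList

-- ===== PRECONDITION & SPEC =====
def Spec_is_construction_content_py (text : String) (out : Bool) : Prop := out = is_construction_content_py_alt text
instance (text : String) (out : Bool) : Decidable (Spec_is_construction_content_py text out) := by unfold Spec_is_construction_content_py; infer_instance

-- ===== CLAIM (what is proved, stated in full; the proofs are below) =====
def Claim_equal_is_construction_content_py : Prop := ∀ (text : String), Dom_is_construction_content_py text → Spec_is_construction_content_py text (is_construction_content_py text)

-- ===== LEMMAS AND PROOFS =====

-- A's keyword list, named so the lemmas can speak about it
def pvKws : List String :=
  ["concrete", "steel", "hvac", "electrical", "plumbing",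
   "structural", "architectural", "mechanical", "specification",
   "drawing", "plan", "elevation", "section", "detail",
   "contractor", "subcontractor", "bid", "estimate"]

-- the first-character index is exhaustive: at a position starting with ch, testing the
-- bucket of ch tests exactly the keywords that can match there
set_option maxRecDepth 4000 in
lemma pv_bucket_any (ch : Char) (rest : List Char) :
  (PySem.Dict.getD pvBuckets ch []).any (fun kw => PySem.Chars.startswith (ch :: rest) kw.toList)
  = pvKws.any (fun kw => PySem.Chars.startswith (ch :: rest) kw.toList) := by
  have hb : pvBuckets = PySem.Dict.mk
    [('c', ["concrete", "contractor"]),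
     ('s', ["steel", "structural", "specification", "section", "subcontractor"]),
     ('h', ["hvac"]),
     ('e', ["electrical", "elevation", "estimate"]),
     ('p', ["plumbing", "plan"]),
     ('a', ["architectural"]),
     ('m', ["mechanical"]),
     ('d', ["drawing", "detail"]),
     ('b', ["bid"])] := by rfl
  rw [hb]
  simp only [PySem.Dict.getD, PySem.Dict.get?_mk_cons]
  split_ifs with h1 h2 h3 h4 h5 h6 h7 h8 h9
  · obtain rfl := beq_iff_eq.mp h1; simp [pvKws, PySem.Chars.startswith, List.isPrefixOf]
  · obtain rfl := beq_iff_eq.mp h2; simp [pvKws, PySem.Chars.startswith, List.isPrefixOf]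
  · obtain rfl := beq_iff_eq.mp h3; simp [pvKws, PySem.Chars.startswith, List.isPrefixOf]
  · obtain rfl := beq_iff_eq.mp h4; simp [pvKws, PySem.Chars.startswith, List.isPrefixOf]
  · obtain rfl := beq_iff_eq.mp h5; simp [pvKws, PySem.Chars.startswith, List.isPrefixOf]
  · obtain rfl := beq_iff_eq.mp h6; simp [pvKws, PySem.Chars.startswith, List.isPrefixOf]
  · obtain rfl := beq_iff_eq.mp h7; simp [pvKws, PySem.Chars.startswith, List.isPrefixOf]
  · obtain rfl := beq_iff_eq.mp h8; simp [pvKws, PySem.Chars.startswith, List.isPrefixOf]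
  · obtain rfl := beq_iff_eq.mp h9; simp [pvKws, PySem.Chars.startswith, List.isPrefixOf]
  · simp_all [pvKws, PySem.Chars.startswith, List.isPrefixOf, PySem.Dict.get?, beq_iff_eq]

-- the suffix scan hits iff some keyword is an infix of the text
lemma pvScan_iff (t : List Char) : pvScan t = true ↔ ∃ kw ∈ pvKws, kw.toList <:+: t := by
  induction t with
  | nil => simp [pvScan, pvKws, List.infix_nil]
  | cons ch rest ih =>
    rw [pvScan, pv_bucket_any]
    split_ifs with hB
    · simp only [true_iff]
      obtain ⟨kw, hm, hs⟩ := List.any_eq_true.mp hB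
      exact ⟨kw, hm, ((PySem.Chars.startswith_iff _ _).mp hs).isInfix⟩
    · rw [ih]
      constructor
      · rintro ⟨kw, hm, hi⟩
        exact ⟨kw, hm, List.infix_cons_iff.mpr (Or.inr hi)⟩
      · rintro ⟨kw, hm, hi⟩
        rcases List.infix_cons_iff.mp hi with hp | hi'
        · exact absurd (List.any_eq_true.mpr ⟨kw, hm, (PySem.Chars.startswith_iff _ _).mpr hp⟩)
            (by simpa using hB)
        · exact ⟨kw, hm, hi'⟩

-- ===== VERDICT (by name: the statement is the Claim_ definition above) =====
theorem is_construction_content_py_spec : Claim_equal_is_construction_content_py := by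
  intro text _
  unfold Spec_is_construction_content_py
  have hA : is_construction_content_py text
      = pvKws.any (fun kw => PySem.Str.isIn kw (PySem.Str.lower text)) := rfl
  have hB : is_construction_content_py_alt text = pvScan (PySem.Str.lower text).toList := rfl
  rw [hA, hB, Bool.eq_iff_iff, List.any_eq_true, pvScan_iff]
  simp only [PySem.Str.isIn_iff_infix]
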